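-- pv_equiv track=rewrite | github.com/direvus/adventofcode | y2019/d22.py | pow_compose
-- ===== SOURCE A (Python) =====
-- def compose(f: tuple, g: tuple, m: int) -> tuple:
--     """Compose two linear congruential functions.
--
--     The arguments `f` and `g` should be each be tuples of two integers,
--     representing the coefficients of a linear congruential function, where both
--     functions have the modulus `m`.
--
--     That is, if the function f(x) is of the form:
--
--         f(x) = (Ax + B) mod m
--
--     Then the tuple argument for `f` should be (A, B).
--
--     The result is a tuple representing the coefficients of the composed
--     function, all modulo `m`.
--     """
--     return ((f[0] * g[0]) % m, (f[1] * g[0] + g[1]) % m)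
--
-- def pow_compose(f: tuple, n: int, m: int) -> tuple:
--     """Compose a linear congruential function into itself.
--
--     The function is composed into itself `n` times, using an exponentiation by
--     squaring trick.
--     """
--     g = (1, 0)
--     while n > 0:
--         if n % 2:
--             g = compose(g, f, m)
--         n //= 2
--         f = compose(f, f, m)
--     return g
-- ===== SOURCE B (Python) =====
-- def compose(f: tuple, g: tuple, m: int) -> tuple:
--     return ((f[0] * g[0]) % m, (f[1] * g[0] + g[1]) % m)
--
--
-- def pow_compose(f: tuple, n: int, m: int) -> tuple:
--     """Compose a linear congruential function into itself `n` times,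
--     by recursive divide-and-conquer on the exponent."""
--     if n <= 0:
--         return (1, 0)
--     half = pow_compose(f, n // 2, m)
--     sq = compose(half, half, m)
--     return compose(sq, f, m) if n % 2 else sq
-- ===== Notes on version B (the rewrite author's own statement) =====
-- stated objective: alternative
-- what changed: Replaced the explicit while-loop with an accumulator pair (g, running square of f) by a recursive divide-and-conquer on the exponent: recurse on n//2, square the recursive result with compose, and compose with f once more when n is odd.
import Mathlib
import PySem

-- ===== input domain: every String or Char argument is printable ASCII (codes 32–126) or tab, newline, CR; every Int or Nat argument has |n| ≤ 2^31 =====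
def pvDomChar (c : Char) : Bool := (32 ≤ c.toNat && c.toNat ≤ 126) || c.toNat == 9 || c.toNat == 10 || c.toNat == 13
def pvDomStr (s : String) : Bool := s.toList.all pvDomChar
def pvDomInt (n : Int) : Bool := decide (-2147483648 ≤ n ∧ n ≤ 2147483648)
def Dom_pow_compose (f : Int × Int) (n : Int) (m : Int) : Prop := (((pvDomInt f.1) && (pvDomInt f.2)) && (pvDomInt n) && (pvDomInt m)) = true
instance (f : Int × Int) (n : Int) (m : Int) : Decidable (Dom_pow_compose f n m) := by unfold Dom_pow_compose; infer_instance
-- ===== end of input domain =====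

-- B replaces A's accumulator while-loop by recursive divide-and-conquer on the exponent
-- (recurse on n//2, square the result, compose once more with f when n is odd); same cost.

-- ===== PORT A =====
-- helper 'compose' from the same module (shared by both Pythons)
def compose (f g : Int × Int) (m : Int) : Int × Int :=
  (PySem.Int.mod (f.1 * g.1) m, PySem.Int.mod (f.2 * g.1 + g.2) m)

-- the 'while n > 0' loop of A, state (g, f, n)
def powLoop (g f : Int × Int) (n m : Int) : Int × Int :=
  if h : 0 < n then
    powLoop (if PySem.Int.mod n 2 ≠ 0 then compose g f m else g)
      (compose f f m) (PySem.Int.floordiv n 2) m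
  else g
termination_by n.toNat
decreasing_by
  have h2 : PySem.Int.floordiv n 2 = n / 2 := PySem.Int.floordiv_eq_ediv_of_pos (by norm_num)
  rw [h2]; omega

def pow_compose (f : Int × Int) (n : Int) (m : Int) : Int × Int :=
  powLoop (1, 0) f n m

-- ===== PORT B =====
def pow_compose_alt (f : Int × Int) (n : Int) (m : Int) : Int × Int :=
  if h : n ≤ 0 then (1, 0)
  else
    let half := pow_compose_alt f (PySem.Int.floordiv n 2) m
    let sq := compose half half m
    if PySem.Int.mod n 2 ≠ 0 then compose sq f m else sq
termination_by n.toNat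
decreasing_by
  have h2 : PySem.Int.floordiv n 2 = n / 2 := PySem.Int.floordiv_eq_ediv_of_pos (by norm_num)
  rw [h2]; omega

-- ===== PRECONDITION & SPEC =====
-- Pre_ excludes exactly the inputs where Python raises ZeroDivisionError (n > 0 forces a '% m'):
def Pre_pow_compose (f : Int × Int) (n : Int) (m : Int) : Prop := n ≤ 0 ∨ m ≠ 0
instance (f : Int × Int) (n : Int) (m : Int) : Decidable (Pre_pow_compose f n m) := by
  unfold Pre_pow_compose; infer_instance

def pvWitness_pow_compose : (Int × Int) × Int × Int := ((3, 5), 6, 7)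

def Spec_pow_compose (f : Int × Int) (n : Int) (m : Int) (out : Int × Int) : Prop :=
  out = pow_compose_alt f n m
instance (f : Int × Int) (n : Int) (m : Int) (out : Int × Int) : Decidable (Spec_pow_compose f n m out) := by
  unfold Spec_pow_compose; infer_instance

-- ===== CLAIM (what is proved, stated in full; the proofs are below) =====
def Claim_equal_pow_compose : Prop := ∀ (f : Int × Int) (n : Int) (m : Int), Dom_pow_compose f n m → Pre_pow_compose f n m → Spec_pow_compose f n m (pow_compose f n m)

-- ===== LEMMAS AND PROOFS =====

-- pure (un-reduced) composition and iterated self-composition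
def cmul (a b : Int × Int) : Int × Int := (a.1 * b.1, a.2 * b.1 + b.2)

def pw (f : Int × Int) : Nat → Int × Int
  | 0 => (1, 0)
  | k + 1 => cmul f (pw f k)

def nrm (m : Int) (p : Int × Int) : Int × Int := (p.1.fmod m, p.2.fmod m)

-- componentwise congruence mod m
def mq (m : Int) (p q : Int × Int) : Prop := p.1 ≡ q.1 [ZMOD m] ∧ p.2 ≡ q.2 [ZMOD m]

theorem fmod_congr {m a b : Int} (h : a ≡ b [ZMOD m]) : a.fmod m = b.fmod m := by
  rw [Int.fmod_eq_fmod_iff_fmod_sub_eq_zero]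
  exact (PySem.Int.mod_eq_zero_iff_dvd (a - b) m).mpr h.symm.dvd

theorem fmod_modeq_self (a m : Int) : a.fmod m ≡ a [ZMOD m] := by
  rw [Int.fmod_eq_emod]
  split_ifs
  · show (a % m + 0) % m = a % m
    rw [add_zero, Int.emod_emod_of_dvd a (dvd_refl m)]
  · show (a % m + m) % m = a % m
    rw [show a % m + m = a % m + m * 1 by ring, Int.add_mul_emod_self_left,
      Int.emod_emod_of_dvd a (dvd_refl m)]

theorem mq_refl (m : Int) (p : Int × Int) : mq m p p := ⟨Int.ModEq.rfl, Int.ModEq.rfl⟩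

theorem nrm_mq_self (m : Int) (p : Int × Int) : mq m (nrm m p) p :=
  ⟨fmod_modeq_self p.1 m, fmod_modeq_self p.2 m⟩

theorem cmul_mq {m : Int} {a a' b b' : Int × Int} (ha : mq m a a') (hb : mq m b b') :
    mq m (cmul a b) (cmul a' b') :=
  ⟨ha.1.mul hb.1, (ha.2.mul hb.1).add hb.2⟩

theorem nrm_eq_of_mq {m : Int} {p q : Int × Int} (h : mq m p q) : nrm m p = nrm m q := by
  unfold nrm
  exact Prod.ext (fmod_congr h.1) (fmod_congr h.2)

theorem pw_mq {m : Int} {p q : Int × Int} (h : mq m p q) (k : Nat) : mq m (pw p k) (pw q k) := by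
  induction k with
  | zero => exact mq_refl m _
  | succ k ih => exact cmul_mq h ih

theorem cmul_assoc (a b c : Int × Int) : cmul (cmul a b) c = cmul a (cmul b c) := by
  unfold cmul
  exact Prod.ext (by ring) (by ring)

theorem cmul_one_left (x : Int × Int) : cmul (1, 0) x = x := by
  unfold cmul; simp

theorem pw_succ_right (f : Int × Int) (k : Nat) : pw f (k + 1) = cmul (pw f k) f := by
  induction k with
  | zero => simp [pw, cmul]
  | succ k ih =>
      calc pw f (k + 2) = cmul f (pw f (k + 1)) := rfl
        _ = cmul f (cmul (pw f k) f) := by rw [ih]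
        _ = cmul (cmul f (pw f k)) f := (cmul_assoc _ _ _).symm
        _ = cmul (pw f (k + 1)) f := rfl

theorem pw_sq (f : Int × Int) (k : Nat) : pw (cmul f f) k = pw f (2 * k) := by
  induction k with
  | zero => rfl
  | succ k ih =>
      have : 2 * (k + 1) = (2 * k + 1) + 1 := by ring
      rw [this]
      calc pw (cmul f f) (k + 1) = cmul (cmul f f) (pw (cmul f f) k) := rfl
        _ = cmul (cmul f f) (pw f (2 * k)) := by rw [ih]
        _ = cmul f (cmul f (pw f (2 * k))) := cmul_assoc _ _ _
        _ = cmul f (pw f (2 * k + 1)) := rfl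
        _ = pw f ((2 * k + 1) + 1) := rfl

theorem pw_add (f : Int × Int) (a b : Nat) : pw f (a + b) = cmul (pw f a) (pw f b) := by
  induction a with
  | zero => simp [pw, cmul_one_left]
  | succ a ih =>
      have : (a + 1) + b = (a + b) + 1 := by ring
      rw [this]
      calc pw f ((a + b) + 1) = cmul f (pw f (a + b)) := rfl
        _ = cmul f (cmul (pw f a) (pw f b)) := by rw [ih]
        _ = cmul (cmul f (pw f a)) (pw f b) := (cmul_assoc _ _ _).symm
        _ = cmul (pw f (a + 1)) (pw f b) := rfl

-- A's loop computes g ∘ f^n, reduced mod m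
theorem loopA (m : Int) (k : Nat) : ∀ (n : Int) (g f : Int × Int), n.toNat = k → 0 < n →
    powLoop g f n m = nrm m (cmul g (pw f n.toNat)) := by
  induction k using Nat.strong_induction_on with
  | _ k ih =>
    intro n g f hk hn
    have h2 : PySem.Int.floordiv n 2 = n / 2 := PySem.Int.floordiv_eq_ediv_of_pos (by norm_num)
    have hm2 : PySem.Int.mod n 2 = n % 2 := PySem.Int.mod_eq_emod_of_pos (by norm_num)
    rw [powLoop, dif_pos hn, h2, hm2]
    by_cases h1 : n = 1
    · subst h1
      rw [powLoop, dif_neg (by norm_num : ¬ (0:Int) < 1 / 2),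
        if_pos (by norm_num : ((1:Int) % 2 ≠ 0))]
      have hp : pw f (1:Int).toNat = f := by simp [pw, cmul]
      rw [hp]
      rfl
    · have hn2 : 0 < n / 2 := by omega
      have hlt : (n / 2).toNat < k := by omega
      have hrec := fun g' => ih _ hlt (n / 2) g' (compose f f m) rfl hn2
      have hcf : compose f f m = nrm m (cmul f f) := rfl
      have hsplit : n.toNat = 2 * (n / 2).toNat + (n % 2).toNat := by omega
      by_cases hodd : n % 2 ≠ 0
      · rw [if_pos hodd, hrec (compose g f m)]
        have hgf : compose g f m = nrm m (cmul g f) := rfl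
        rw [hgf, hcf]
        have e1 : nrm m (cmul (nrm m (cmul g f)) (pw (nrm m (cmul f f)) ((n / 2).toNat)))
            = nrm m (cmul (cmul g f) (pw (cmul f f) ((n / 2).toNat))) :=
          nrm_eq_of_mq (cmul_mq (nrm_mq_self m _) (pw_mq (nrm_mq_self m _) _))
        rw [e1, pw_sq, cmul_assoc]
        have hstep : cmul f (pw f (2 * (n / 2).toNat)) = pw f (2 * (n / 2).toNat + 1) := rfl
        have hone : n.toNat = 2 * (n / 2).toNat + 1 := by omega
        rw [hstep, hone]
      · rw [if_neg hodd, hrec g, hcf]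
        have e1 : nrm m (cmul g (pw (nrm m (cmul f f)) ((n / 2).toNat)))
            = nrm m (cmul g (pw (cmul f f) ((n / 2).toNat))) :=
          nrm_eq_of_mq (cmul_mq (mq_refl m g) (pw_mq (nrm_mq_self m _) _))
        rw [e1, pw_sq]
        have hzero : n.toNat = 2 * (n / 2).toNat := by omega
        rw [hzero]

-- B computes f^n reduced mod m
theorem altEq (m : Int) (k : Nat) : ∀ (n : Int) (f : Int × Int), n.toNat = k → 0 < n →
    pow_compose_alt f n m = nrm m (pw f n.toNat) := by
  induction k using Nat.strong_induction_on with
  | _ k ih =>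
    intro n f hk hn
    have h2 : PySem.Int.floordiv n 2 = n / 2 := PySem.Int.floordiv_eq_ediv_of_pos (by norm_num)
    have hm2 : PySem.Int.mod n 2 = n % 2 := PySem.Int.mod_eq_emod_of_pos (by norm_num)
    rw [pow_compose_alt, dif_neg (by omega : ¬ n ≤ 0)]
    simp only [h2, hm2]
    have hsplit : n.toNat = 2 * (n / 2).toNat + (n % 2).toNat := by omega
    by_cases h1 : n = 1
    · subst h1
      have hhalf : pow_compose_alt f ((1:Int) / 2) m = (1, 0) := by
        rw [pow_compose_alt, dif_pos (by norm_num : (1:Int) / 2 ≤ 0)]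
      rw [hhalf, if_pos (by norm_num : ((1:Int) % 2 ≠ 0))]
      have e0 : compose (compose (1, 0) (1, 0) m) f m
          = nrm m (cmul (nrm m (cmul (1, 0) (1, 0))) f) := rfl
      rw [e0, nrm_eq_of_mq (cmul_mq (nrm_mq_self m _) (mq_refl m f))]
      have e1 : cmul (cmul (1, 0) (1, 0)) f = pw f (1:Int).toNat := by simp [pw, cmul]
      rw [e1]
    · have hn2 : 0 < n / 2 := by omega
      have hlt : (n / 2).toNat < k := by omega
      have hrec := ih _ hlt (n / 2) f rfl hn2
      rw [hrec]
      have hsq : compose (nrm m (pw f (n / 2).toNat)) (nrm m (pw f (n / 2).toNat)) m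
          = nrm m (pw f (2 * (n / 2).toNat)) := by
        have e1 : compose (nrm m (pw f (n / 2).toNat)) (nrm m (pw f (n / 2).toNat)) m
            = nrm m (cmul (nrm m (pw f (n / 2).toNat)) (nrm m (pw f (n / 2).toNat))) := rfl
        rw [e1, nrm_eq_of_mq (cmul_mq (nrm_mq_self m _) (nrm_mq_self m _)),
          ← pw_add, two_mul]
      by_cases hodd : n % 2 ≠ 0
      · rw [if_pos hodd, hsq]
        have e2 : compose (nrm m (pw f (2 * (n / 2).toNat))) f m
            = nrm m (cmul (nrm m (pw f (2 * (n / 2).toNat))) f) := rfl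
        rw [e2, nrm_eq_of_mq (cmul_mq (nrm_mq_self m _) (mq_refl m f)),
          ← pw_succ_right]
        have hone : n.toNat = 2 * (n / 2).toNat + 1 := by omega
        rw [hone]
      · rw [if_neg hodd, hsq]
        have hzero : n.toNat = 2 * (n / 2).toNat := by omega
        rw [hzero]

-- ===== VERDICT (by name: the statement is the Claim_ definition above) =====
theorem pow_compose_spec : Claim_equal_pow_compose := by
  intro f n m _ _
  unfold Spec_pow_compose pow_compose
  by_cases hn : 0 < n
  · rw [loopA m n.toNat n (1, 0) f rfl hn, altEq m n.toNat n f rfl hn, cmul_one_left]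
  · rw [powLoop, dif_neg hn, pow_compose_alt, dif_pos (by omega : n ≤ 0)]
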